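-- pv_equiv track=rewrite | github.com/snailtail/AdventOfCode | 2015/python/day01.py | parse_parenthesis
-- ===== SOURCE A (Python) =====
-- def parse_parenthesis(input: str) -> (int, int):
--     value = 0
--     part2_index = None
--     for i, c in enumerate(input):
--         if c == '(':
--             value +=1
--         elif c == ')':
--             value -= 1
--
--         if value == -1 and part2_index is None:
--             part2_index = i
--
--     if part2_index is None:
--         part2_index = -1
--
--     return (value, part2_index+1)
-- ===== SOURCE B (Python) =====
-- def _first_below(s):
--     """Index of the first character after which the running depth goes negative, or None."""
--     depth = 0
--     for i, c in enumerate(s):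
--         depth += (c == '(') - (c == ')')
--         if depth < 0:
--             return i
--     return None
--
--
-- def parse_parenthesis(input: str) -> (int, int):
--     value = input.count('(') - input.count(')')
--     i = _first_below(input)
--     return (value, 0 if i is None else i + 1)
-- ===== Notes on version B (the rewrite author's own statement) =====
-- stated objective: alternative
-- what changed: Splits the combined single loop into two independent passes: the final balance is computed in closed form via str.count, and the first-basement index by a separate early-exit scan in a helper that returns the index directly (None if never reached) instead of threading an optional through the whole loop.
import Mathlib
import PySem

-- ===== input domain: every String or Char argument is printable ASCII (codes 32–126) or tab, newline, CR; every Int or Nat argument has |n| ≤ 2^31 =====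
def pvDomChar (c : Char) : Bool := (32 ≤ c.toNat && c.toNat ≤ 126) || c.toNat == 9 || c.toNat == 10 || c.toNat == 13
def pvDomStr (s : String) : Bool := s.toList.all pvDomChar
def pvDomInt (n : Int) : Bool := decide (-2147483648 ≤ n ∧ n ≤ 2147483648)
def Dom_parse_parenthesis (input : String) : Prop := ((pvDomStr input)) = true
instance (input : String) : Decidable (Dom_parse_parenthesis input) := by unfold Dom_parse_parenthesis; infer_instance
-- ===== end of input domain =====

-- ===== PORT A =====
-- One combined loop over enumerate(input), threading (value, optional first index of -1).
def parse_parenthesis (input : String) : Int × Int :=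
  let st := (PySem.List.enumerate input.toList 0).foldl
    (fun (s : Int × Option Int) (p : Int × Char) =>
      let v := if p.2 = '(' then s.1 + 1 else if p.2 = ')' then s.1 - 1 else s.1
      (v, if v = -1 ∧ s.2 = none then some p.1 else s.2))
    ((0 : Int), (none : Option Int))
  (st.1, st.2.getD (-1) + 1)

-- ===== PORT B =====
-- Helper: first index after which the running depth goes negative, none if never.
def pvFirstBelow? : List Char → Int → Int → Option Int
  | [], _, _ => none
  | c :: rest, i, depth =>
    let d := depth + (if c = '(' then (1 : Int) else 0) - (if c = ')' then 1 else 0)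
    if d < 0 then some i else pvFirstBelow? rest (i + 1) d

def parse_parenthesis_alt (input : String) : Int × Int :=
  let value : Int := (input.toList.count '(' : Int) - (input.toList.count ')' : Int)
  let part2 : Int :=
    match pvFirstBelow? input.toList 0 0 with
    | none => 0
    | some i => i + 1
  (value, part2)

-- ===== PRECONDITION & SPEC =====
def Spec_parse_parenthesis (input : String) (out : Int × Int) : Prop := out = parse_parenthesis_alt input
instance (input : String) (out : Int × Int) : Decidable (Spec_parse_parenthesis input out) := by unfold Spec_parse_parenthesis; infer_instance

-- ===== CLAIM (what is proved, stated in full; the proofs are below) =====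
def Claim_equal_parse_parenthesis : Prop := ∀ (input : String), Dom_parse_parenthesis input → Spec_parse_parenthesis input (parse_parenthesis input)

-- ===== LEMMAS AND PROOFS =====

-- A's loop step, named for the lemmas.
def pvStepA (s : Int × Option Int) (p : Int × Char) : Int × Option Int :=
  let v := if p.2 = '(' then s.1 + 1 else if p.2 = ')' then s.1 - 1 else s.1
  (v, if v = -1 ∧ s.2 = none then some p.1 else s.2)

def pvDelta (l : List Char) : Int := (l.count '(' : Int) - (l.count ')' : Int)

theorem pvDelta_cons (c : Char) (l : List Char) :
    pvDelta (c :: l) = (if c = '(' then (1:Int) else 0) - (if c = ')' then 1 else 0) + pvDelta l := by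
  unfold pvDelta
  by_cases h1 : c = '(' <;> by_cases h2 : c = ')' <;>
    simp [h1, h2] <;> push_cast <;> ring

-- Once the option is some j, it stays some j and value accumulates pvDelta.
theorem foldA_some (l : List Char) : ∀ (i v j : Int),
    (PySem.List.enumerate l i).foldl pvStepA (v, some j) = (v + pvDelta l, some j) := by
  induction l with
  | nil => intro i v j; simp [pvDelta, PySem.List.enumerate_nil]
  | cons c rest ih =>
    intro i v j
    rw [PySem.List.enumerate_cons, List.foldl_cons]
    have : pvStepA (v, some j) (i, c) =
        ((if c = '(' then v + 1 else if c = ')' then v - 1 else v), some j) := by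
      simp [pvStepA]
    rw [this, ih]
    rw [pvDelta_cons]
    by_cases h1 : c = '(' <;> by_cases h2 : c = ')' <;> simp [h1, h2] <;> ring_nf

-- Main invariant: from a nonnegative value with no index yet, A's fold computes
-- (v + pvDelta l, pvFirstBelow? l i v).
theorem foldA_none (l : List Char) : ∀ (i v : Int), 0 ≤ v →
    (PySem.List.enumerate l i).foldl pvStepA (v, none) = (v + pvDelta l, pvFirstBelow? l i v) := by
  induction l with
  | nil => intro i v _; simp [pvDelta, pvFirstBelow?, PySem.List.enumerate_nil]
  | cons c rest ih =>
    intro i v hv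
    rw [PySem.List.enumerate_cons, List.foldl_cons]
    have hdeq : v + (if c = '(' then (1 : Int) else 0) - (if c = ')' then 1 else 0)
        = (if c = '(' then v + 1 else if c = ')' then v - 1 else v) := by
      by_cases h1 : c = '(' <;> by_cases h2 : c = ')' <;> simp [h1, h2] <;> ring
    have hfb : pvFirstBelow? (c :: rest) i v =
        (if (if c = '(' then v + 1 else if c = ')' then v - 1 else v) < 0 then some i
         else pvFirstBelow? rest (i + 1) (if c = '(' then v + 1 else if c = ')' then v - 1 else v)) := by
      show (let d := v + (if c = '(' then (1 : Int) else 0) - (if c = ')' then 1 else 0);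
            if d < 0 then some i else pvFirstBelow? rest (i + 1) d) = _
      rw [hdeq]
    have hval : (if c = '(' then v + 1 else if c = ')' then v - 1 else v) + pvDelta rest
        = v + pvDelta (c :: rest) := by
      rw [pvDelta_cons]
      by_cases h1 : c = '(' <;> by_cases h2 : c = ')' <;> simp [h1, h2] <;> ring
    have hbound : -1 ≤ (if c = '(' then v + 1 else if c = ')' then v - 1 else v) := by
      by_cases h1 : c = '(' <;> by_cases h2 : c = ')' <;> simp [h1, h2] <;> omega
    by_cases hneg : (if c = '(' then v + 1 else if c = ')' then v - 1 else v) < 0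
    · have hz : (if c = '(' then v + 1 else if c = ')' then v - 1 else v) = -1 := by omega
      have hstep : pvStepA (v, none) (i, c) =
          ((if c = '(' then v + 1 else if c = ')' then v - 1 else v), some i) := by
        simp only [pvStepA]
        rw [hz]
        simp
      rw [hstep, hz, foldA_some, hfb, if_pos hneg]
      rw [show (-1 : Int) + pvDelta rest = (if c = '(' then v + 1 else if c = ')' then v - 1 else v) + pvDelta rest by rw [hz], hval]
    · have hne : (if c = '(' then v + 1 else if c = ')' then v - 1 else v) ≠ -1 := by omega
      have hstep : pvStepA (v, none) (i, c) =
          ((if c = '(' then v + 1 else if c = ')' then v - 1 else v), none) := by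
        simp only [pvStepA]
        simp [hne]
      rw [hstep, ih (i + 1) _ (by omega), hfb, if_neg hneg, hval]

-- ===== VERDICT (by name: the statement is the Claim_ definition above) =====
theorem parse_parenthesis_spec : Claim_equal_parse_parenthesis := by
  intro input _
  unfold Spec_parse_parenthesis parse_parenthesis parse_parenthesis_alt
  have h := foldA_none input.toList 0 0 (le_refl 0)
  have hfold : (PySem.List.enumerate input.toList 0).foldl
      (fun (s : Int × Option Int) (p : Int × Char) =>
        let v := if p.2 = '(' then s.1 + 1 else if p.2 = ')' then s.1 - 1 else s.1
        (v, if v = -1 ∧ s.2 = none then some p.1 else s.2))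
      ((0 : Int), (none : Option Int)) = (pvDelta input.toList, pvFirstBelow? input.toList 0 0) := by
    have : (fun (s : Int × Option Int) (p : Int × Char) =>
        let v := if p.2 = '(' then s.1 + 1 else if p.2 = ')' then s.1 - 1 else s.1
        (v, if v = -1 ∧ s.2 = none then some p.1 else s.2)) = pvStepA := by
      funext s p; simp [pvStepA]
    rw [this, h]; simp
  simp only [hfold]
  cases hfb : pvFirstBelow? input.toList 0 0 with
  | none => simp [pvDelta]
  | some i => simp [pvDelta]
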